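-- pv_equiv track=rewrite | github.com/berkay-ozcelik/NumericalAnalysis | ieee754.py | __look_for_point
-- ===== SOURCE A (Python) =====
-- def __look_for_point(str_repr: str):
--     length = len(str_repr)
--     for idx in range(length):
--         ch = str_repr[idx]
--         if ch == '.':
--             return idx
--         elif not ('0' <= ch <= '9'):
--             raise Exception("Not an decimal literal at string representation. ch = " + ch)
--     return -1
-- ===== SOURCE B (Python) =====
-- def __look_for_point(str_repr: str):
--     point = str_repr.find('.')
--     part = str_repr if point == -1 else str_repr[:point]
--     for ch in part:
--         if not ('0' <= ch <= '9'):
--             raise Exception("Not an decimal literal at string representation. ch = " + ch)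
--     return point
-- ===== Notes on version B (the rewrite author's own statement) =====
-- stated objective: idiomatic
-- what changed: B locates the decimal point with str.find up front and then validates only the digit prefix in a separate pass, instead of A's single indexed loop that interleaves point detection and validation.
import Mathlib
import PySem

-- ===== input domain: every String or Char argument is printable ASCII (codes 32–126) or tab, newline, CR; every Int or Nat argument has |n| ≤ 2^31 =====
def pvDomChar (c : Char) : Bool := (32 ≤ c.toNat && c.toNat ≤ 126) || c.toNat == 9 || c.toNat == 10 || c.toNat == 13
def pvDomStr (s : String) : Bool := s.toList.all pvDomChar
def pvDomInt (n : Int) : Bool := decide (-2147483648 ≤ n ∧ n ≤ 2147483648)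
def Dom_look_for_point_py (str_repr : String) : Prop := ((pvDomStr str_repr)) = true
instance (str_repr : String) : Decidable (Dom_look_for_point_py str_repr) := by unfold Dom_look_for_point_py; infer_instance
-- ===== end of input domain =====

-- B separates locating the decimal point (str.find) from validating the digit prefix
-- (a second pass), instead of A's single indexed loop doing both; objective: idiomatic.

def pvIsDig (c : Char) : Bool := decide ('0' ≤ c) && decide (c ≤ '9')

-- ===== PORT A =====
-- A's loop over range(len): returns some idx at the point, none models the raise.
def pvALoop : List Char → Int → Option Int
  | [], _ => some (-1)
  | c :: cs, i => if c = '.' then some i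
      else if pvIsDig c then pvALoop cs (i + 1) else none

def look_for_point_py (str_repr : String) : Int :=
  (pvALoop str_repr.toList 0).getD 0

-- ===== PORT B =====
-- B's validation loop over the prefix; false models the raise.
def pvBCheck : List Char → Bool
  | [] => true
  | c :: cs => if pvIsDig c then pvBCheck cs else false

def look_for_point_py_alt (str_repr : String) : Int :=
  let point := PySem.Str.find str_repr "."
  let part := if point = -1 then str_repr.toList
              else PySem.List.slice str_repr.toList none (some point)
  if pvBCheck part then point else 0

-- ===== PRECONDITION & SPEC =====
-- Pre_ excludes exactly the inputs where A raises (a non-digit before the first point):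
-- every character before the first decimal point (or all characters, if there is none) is a digit.
def Pre_look_for_point_py (str_repr : String) : Prop :=
  (str_repr.toList.takeWhile (· ≠ '.')).all pvIsDig = true
instance (str_repr : String) : Decidable (Pre_look_for_point_py str_repr) := by
  unfold Pre_look_for_point_py; infer_instance

def pvWitness_look_for_point_py : String := "3.25"

def Spec_look_for_point_py (str_repr : String) (out : Int) : Prop := out = look_for_point_py_alt str_repr
instance (str_repr : String) (out : Int) : Decidable (Spec_look_for_point_py str_repr out) := by unfold Spec_look_for_point_py; infer_instance

-- ===== CLAIM (what is proved, stated in full; the proofs are below) =====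
def Claim_equal_look_for_point_py : Prop := ∀ (str_repr : String), Dom_look_for_point_py str_repr → Pre_look_for_point_py str_repr → Spec_look_for_point_py str_repr (look_for_point_py str_repr)

-- ===== LEMMAS AND PROOFS =====

lemma pv_singleton_prefix_iff (a : Char) (t : List Char) :
    [a] <+: t ↔ t.head? = some a := by
  cases t with
  | nil => simp
  | cons x xs => simp [List.cons_prefix_cons, eq_comm]

lemma pv_idxOf_eq_of_min (a : Char) (s : List Char) (k : Nat)
    (h1 : s[k]? = some a) (h2 : ∀ i < k, s[i]? ≠ some a) : s.idxOf a = k := by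
  induction s generalizing k with
  | nil => simp at h1
  | cons c cs ih =>
    by_cases hc : c = a
    · subst hc
      cases k with
      | zero => simp
      | succ k' => exact absurd (h2 0 (Nat.succ_pos _)) (by simp)
    · cases k with
      | zero => simp at h1; exact absurd h1 hc
      | succ k' =>
        rw [List.idxOf_cons_ne _ (by simpa using hc)]
        have := ih k' (by simpa using h1)
          (fun i hi => by simpa using h2 (i + 1) (by omega))
        omega

lemma pv_find_singleton (a : Char) (s : List Char) :
    PySem.Chars.find s [a] = if a ∈ s then (s.idxOf a : Int) else -1 := by
  by_cases hm : a ∈ s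
  · have hinf : [a] <:+: s := by
      obtain ⟨t₁, t₂, rfl⟩ := List.append_of_mem hm
      exact ⟨t₁, t₂, by simp⟩
    have hnn : 0 ≤ PySem.Chars.find s [a] := (PySem.Chars.find_nonneg_iff s [a]).2 hinf
    obtain ⟨hpre, hmin⟩ := PySem.Chars.find_spec (s := s) (sub := [a]) hnn
    have hlt : (PySem.Chars.find s [a]).toNat < s.length := by
      have := PySem.Chars.find_le_length (s := s) (sub := [a])
      rcases lt_or_eq_of_le this with h | h
      · omega
      · exfalso
        rw [pv_singleton_prefix_iff] at hpre
        have : s.drop (PySem.Chars.find s [a]).toNat = [] := by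
          apply List.drop_eq_nil_of_le; omega
        rw [this] at hpre; simp at hpre
    have hget : s[(PySem.Chars.find s [a]).toNat]? = some a := by
      have := (pv_singleton_prefix_iff a _).1 hpre
      rwa [List.head?_drop] at this
    have hidx : s.idxOf a = (PySem.Chars.find s [a]).toNat := by
      apply pv_idxOf_eq_of_min a s _ hget
      intro i hi hcon
      exact hmin i (by omega) ((pv_singleton_prefix_iff a _).2 (by rwa [List.head?_drop]))
    simp [hm, hidx]; omega
  · have : ¬ [a] <:+: s := by
      intro ⟨t₁, t₂, h⟩
      exact hm (h ▸ by simp)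
    simp [hm, (PySem.Chars.find_eq_neg_one_iff s [a]).2 this]

lemma pv_takeWhile_eq_take (a : Char) (l : List Char) :
    l.takeWhile (· ≠ a) = l.take (l.idxOf a) := by
  induction l with
  | nil => simp
  | cons c cs ih =>
    by_cases hc : c = a
    · subst hc; simp
    · rw [List.takeWhile_cons, if_pos (by simpa using hc),
        List.idxOf_cons_ne _ (by simpa using hc), List.take_succ_cons, ih]

lemma pv_bcheck_of_all (l : List Char) (h : ∀ c ∈ l, pvIsDig c = true) :
    pvBCheck l = true := by
  induction l with
  | nil => rfl
  | cons c cs ih =>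
    simp [pvBCheck, h c (by simp), ih (fun x hx => h x (by simp [hx]))]

lemma pv_aloop_no_dot (l : List Char) (hn : '.' ∉ l)
    (hd : ∀ c ∈ l, pvIsDig c = true) : ∀ i, pvALoop l i = some (-1) := by
  induction l with
  | nil => intro i; rfl
  | cons c cs ih =>
    intro i
    have hc : c ≠ '.' := fun h => hn (h ▸ by simp)
    simp only [pvALoop, if_neg hc, hd c (by simp), if_true]
    exact ih (fun h => hn (by simp [h])) (fun x hx => hd x (by simp [hx])) _

lemma pv_aloop_dot (l : List Char) (hm : '.' ∈ l)
    (hd : ∀ c ∈ l.takeWhile (· ≠ '.'), pvIsDig c = true) :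
    ∀ i, pvALoop l i = some (i + l.idxOf '.') := by
  induction l with
  | nil => simp at hm
  | cons c cs ih =>
    intro i
    by_cases hc : c = '.'
    · subst hc; simp [pvALoop]
    · have hm' : '.' ∈ cs := by rcases List.mem_cons.1 hm with h | h; exact absurd h.symm hc; exact h
      have htw : (c :: cs).takeWhile (· ≠ '.') = c :: cs.takeWhile (· ≠ '.') := by
        rw [List.takeWhile_cons, if_pos (by simpa using hc)]
      have hdc : pvIsDig c = true := hd c (htw ▸ List.mem_cons_self ..)
      have hd' : ∀ x ∈ cs.takeWhile (· ≠ '.'), pvIsDig x = true := by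
        intro x hx; exact hd x (htw ▸ List.mem_cons_of_mem _ hx)
      simp only [pvALoop, if_neg hc, hdc, if_true, ih hm' hd' (i + 1),
        List.idxOf_cons_ne _ (by simpa using hc)]
      congr 1
      push_cast
      ring

-- ===== VERDICT (by name: the statement is the Claim_ definition above) =====
theorem look_for_point_py_spec : Claim_equal_look_for_point_py := by
  intro s _ hpre
  unfold Spec_look_for_point_py
  simp only [look_for_point_py, look_for_point_py_alt]
  have hfind : PySem.Str.find s "." = PySem.Chars.find s.toList ['.'] := by
    simp [PySem.Str.find_eq]
  have hpre' : ∀ c ∈ s.toList.takeWhile (· ≠ '.'), pvIsDig c = true := by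
    have := hpre; unfold Pre_look_for_point_py at this
    simpa [List.all_eq_true] using this
  by_cases hm : '.' ∈ s.toList
  · have hfv : PySem.Chars.find s.toList ['.'] = (s.toList.idxOf '.' : Int) := by
      rw [pv_find_singleton]; simp [hm]
    have hne : ((s.toList.idxOf '.' : Nat) : Int) ≠ -1 := by omega
    rw [hfind, hfv]
    simp only [if_neg hne, PySem.List.slice_to_natCast]
    rw [pv_bcheck_of_all _ (by rw [← pv_takeWhile_eq_take]; exact hpre')]
    simp [pv_aloop_dot s.toList hm hpre' 0]
  · have hfv : PySem.Chars.find s.toList ['.'] = -1 := by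
      rw [pv_find_singleton]; simp [hm]
    rw [hfind, hfv]
    have htw : s.toList.takeWhile (· ≠ '.') = s.toList := by
      apply List.takeWhile_eq_self_iff.2 ?_
      intro x hx
      simp only [ne_eq, decide_eq_true_eq]
      intro h; exact hm (h ▸ hx)
    rw [if_pos rfl, pv_bcheck_of_all _ (fun c hc => hpre' c (by rw [htw]; exact hc))]
    simp [pv_aloop_no_dot s.toList hm (fun c hc => hpre' c (by rw [htw]; exact hc)) 0]
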